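-- pv_equiv track=rewrite | github.com/fadyat/itmo-highload-bioinf | mass-spectrometry/main.py | get_peptide
-- ===== SOURCE A (Python) =====
-- from itertools import accumulate, takewhile
--
-- ALPHABET = {
--     'A': 71, 'C': 103, 'D': 115, 'E': 129, 'F': 147, 'G': 57, 'H': 137, 'I': 113, 'K': 128, 'L': 113,
--     'M': 131, 'N': 114, 'P': 97, 'Q': 128, 'R': 156, 'S': 87, 'T': 101, 'V': 99, 'W': 186, 'Y': 163
-- }
--
-- def get_spectrum(s: str) -> list[int]:
--     prefixes = list(accumulate((ALPHABET[c] for c in s), initial=0))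
--     total = prefixes[-1]
--     return sorted(set(prefixes) | {total - p for p in prefixes})
--
-- def get_peptide(spectrum: set[int]) -> str | None:
--     target = max(spectrum)
--
--     def dfs(mass: int, path: str) -> str | None:
--         if mass == target:
--             if set(get_spectrum(path)) == spectrum:
--                 return path
--
--             return None
--
--         for aa, m in ALPHABET.items():
--             nm = mass + m
--             if {nm, target - nm} <= spectrum:
--                 if (r := dfs(nm, path + aa)) is not None:
--                     return r
--
--         return None
--
--     return dfs(0, "")
-- ===== SOURCE B (Python) =====
-- ALPHABET = {
--     'A': 71, 'C': 103, 'D': 115, 'E': 129, 'F': 147, 'G': 57, 'H': 137, 'I': 113, 'K': 128, 'L': 113,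
--     'M': 131, 'N': 114, 'P': 97, 'Q': 128, 'R': 156, 'S': 87, 'T': 101, 'V': 99, 'W': 186, 'Y': 163
-- }
--
-- def get_peptide(spectrum):
--     target = max(spectrum)
--     stack = [("", [0])]
--     while stack:
--         path, prefixes = stack.pop()
--         mass = prefixes[-1]
--         if mass == target:
--             if set(prefixes) | {target - p for p in prefixes} == spectrum:
--                 return path
--             continue
--         children = [(path + aa, prefixes + [mass + m]) for aa, m in ALPHABET.items()
--                     if mass + m in spectrum and target - mass - m in spectrum]
--         stack.extend(reversed(children))
--     return None
-- ===== Notes on version B (the rewrite author's own statement) =====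
-- stated objective: alternative
-- what changed: the recursive dfs closure is replaced by an explicit-stack iterative DFS whose entries carry the prefix-mass list of the path, so the acceptance test is a direct set comparison of prefixes and their complements instead of re-deriving the spectrum via get_spectrum/accumulate/sorted; children are pushed in reversed alphabet order to preserve A's exact preorder
import Mathlib
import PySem

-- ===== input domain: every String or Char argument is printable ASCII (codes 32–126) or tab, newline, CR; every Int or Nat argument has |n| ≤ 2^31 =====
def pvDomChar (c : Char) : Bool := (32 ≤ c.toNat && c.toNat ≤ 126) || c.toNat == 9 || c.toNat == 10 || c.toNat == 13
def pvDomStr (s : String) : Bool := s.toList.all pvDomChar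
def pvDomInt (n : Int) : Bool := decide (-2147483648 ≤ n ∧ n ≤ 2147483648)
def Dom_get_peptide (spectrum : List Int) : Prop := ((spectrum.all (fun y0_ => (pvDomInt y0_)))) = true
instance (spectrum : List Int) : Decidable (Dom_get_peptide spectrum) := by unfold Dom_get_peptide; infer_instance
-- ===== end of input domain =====

-- B replaces A's recursive dfs closure (which re-derives the spectrum of the finished path
-- through get_spectrum) by an explicit-stack DFS whose entries carry the prefix-mass list,
-- so the final check is a direct set comparison; objective: alternative, same preorder.

-- ===== PORT A =====

-- the module constant ALPHABET (a dict, insertion order)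
def ALPH : List (String × Int) :=
  [("A",71),("C",103),("D",115),("E",129),("F",147),("G",57),("H",137),("I",113),("K",128),("L",113),
   ("M",131),("N",114),("P",97),("Q",128),("R",156),("S",87),("T",101),("V",99),("W",186),("Y",163)]

-- ALPHABET[c]; the default 0 is unreachable here: get_spectrum is only ever called on
-- strings built from ALPH keys, so the KeyError branch never fires.
def alphaVal (c : Char) : Int := ((PySem.Dict.ofList ALPH).get? c.toString).getD 0

-- helper get_spectrum: accumulate(..., initial=0) is scanl (+) 0; prefixes[-1] is the last
-- element (prefixes is never empty, so getLastD's default is unreachable).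
def get_spectrum (s : String) : List Int :=
  let prefixes : List Int := (s.toList.map alphaVal).scanl (· + ·) 0
  let total : Int := prefixes.getLastD 0
  PySem.List.sorted (PySem.Set.union (PySem.Set.ofList prefixes) (prefixes.map (fun p => total - p)))
    (fun x => x) false

-- measure for the DFS: how many spectrum entries are still greater than the current mass
def phiM (spectrum : List Int) (mass : Int) : Nat :=
  (spectrum.filter (fun x => mass < x)).length

theorem alph_pos : ∀ p ∈ ALPH, (0 : Int) < p.2 := by decide

theorem phiM_lt {spectrum : List Int} {mass nm : Int} (hmem : nm ∈ spectrum) (hlt : mass < nm) :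
    phiM spectrum nm < phiM spectrum mass := by
  unfold phiM
  induction spectrum with
  | nil => cases hmem
  | cons a l ih =>
    simp only [List.filter_cons]
    rcases List.mem_cons.1 hmem with rfl | ha
    · simp only [decide_eq_true_eq]
      rw [if_pos hlt, if_neg (lt_irrefl nm)]
      simp only [List.length_cons]
      have : (l.filter (fun x => decide (nm < x))).length ≤ (l.filter (fun x => decide (mass < x))).length := by
        apply List.Sublist.length_le
        apply List.monotone_filter_right
        intro x hx
        simp at hx ⊢; omega
      omega
    · have := ih ha
      by_cases hna : nm < a
      · have h1 : decide (mass < a) = true := by simp; omega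
        have h2 : decide (nm < a) = true := by simpa using hna
        rw [h1, h2]; simpa using this
      · by_cases hma : mass < a
        · have h1 : decide (mass < a) = true := by simpa using hma
          have h2 : decide (nm < a) = false := by simp; omega
          rw [h1, h2]; simp; omega
        · have h1 : decide (mass < a) = false := by simpa using hma
          have h2 : decide (nm < a) = false := by simp; omega
          rw [h1, h2]; exact this

-- A's subset guard {nm, target - nm} <= spectrum
def guardA (spectrum : List Int) (target mass : Int) (m : Int) : Bool :=
  PySem.Set.issubset (PySem.Set.ofList [mass + m, target - (mass + m)]) spectrum

theorem guardA_mem {spectrum : List Int} {target mass m : Int}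
    (h : guardA spectrum target mass m = true) : mass + m ∈ spectrum := by
  unfold guardA at h
  exact (PySem.Set.issubset_iff _ _).1 h (mass + m) (by rw [PySem.Set.mem_ofList]; simp)

-- the dfs closure of A: dfsA is the body, dfsGo its for-loop over ALPHABET.items()
-- (carried as the suffix of ALPH still to scan, with its membership proof for termination)
mutual
def dfsA (spectrum : List Int) (target mass : Int) (path : String) : Option String :=
  if mass == target then
    if PySem.Set.equal (PySem.Set.ofList (get_spectrum path)) spectrum then some path else none
  else
    dfsGo spectrum target mass path ALPH.attach
termination_by phiM spectrum mass * 22 + 21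
decreasing_by
  simp only [List.length_attach]
  have h20 : ALPH.length = 20 := by decide
  omega

def dfsGo (spectrum : List Int) (target mass : Int) (path : String) :
    List {p : String × Int // p ∈ ALPH} → Option String
  | [] => none
  | ⟨(aa, m), hp⟩ :: rest =>
    if hg : guardA spectrum target mass m = true then
      match dfsA spectrum target (mass + m) (path ++ aa) with
      | some r => some r
      | none => dfsGo spectrum target mass path rest
    else
      dfsGo spectrum target mass path rest
termination_by l => phiM spectrum mass * 22 + l.length
decreasing_by
  · have hm : (0 : Int) < m := alph_pos _ hp
    have h1 : phiM spectrum (mass + m) < phiM spectrum mass :=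
      phiM_lt (guardA_mem hg) (by omega)
    omega
  · simp only [List.length_cons]; omega
  · simp only [List.length_cons]; omega
end

def get_peptide (spectrum : List Int) : Option String :=
  match PySem.List.max? spectrum (fun x => x) with
  | none => none          -- max(spectrum) raises ValueError on the empty set; excluded by Pre_
  | some target => dfsA spectrum target 0 ""

-- ===== PORT B =====

-- the children list comprehension of Source B (entries carry path AND its prefix-mass list)
def childrenB (spectrum : List Int) (target : Int) (path : String) (prefixes : List Int)
    (mass : Int) : List (String × List Int) :=
  (ALPH.filter (fun p => PySem.Set.contains spectrum (mass + p.2)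
      && PySem.Set.contains spectrum (target - mass - p.2))).map
    (fun p => (path ++ p.1, prefixes ++ [mass + p.2]))

-- stack measure: each entry weighs 21^phiM of its current mass (= last prefix; ALPH has 20
-- entries, so a popped entry always outweighs the children pushed in its place)
def stackM (spectrum : List Int) (stack : List (String × List Int)) : Nat :=
  (stack.map (fun e => 21 ^ phiM spectrum (e.2.getLastD 0))).sum

theorem stackM_children_lt (spectrum : List Int) (target : Int) (path : String)
    (prefixes : List Int) (mass : Int) :
    stackM spectrum (childrenB spectrum target path prefixes mass) < 21 ^ phiM spectrum mass := by
  unfold stackM childrenB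
  rw [List.map_map]
  have hfun : ((fun e : String × List Int => 21 ^ phiM spectrum (e.2.getLastD 0)) ∘
      (fun p : String × Int => (path ++ p.1, prefixes ++ [mass + p.2])))
      = fun p : String × Int => 21 ^ phiM spectrum (mass + p.2) := by
    funext p
    simp
  rw [hfun]
  set L := ALPH.filter (fun p => PySem.Set.contains spectrum (mass + p.2)
      && PySem.Set.contains spectrum (target - mass - p.2)) with hL
  by_cases hL0 : L = []
  · rw [hL0]
    simp only [List.map_nil, List.sum_nil]
    exact pow_pos (by norm_num) _
  · have hchild : ∀ p ∈ L, phiM spectrum (mass + p.2) < phiM spectrum mass := by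
      intro p hp
      obtain ⟨hpA, hg⟩ := List.mem_filter.1 hp
      obtain ⟨hg1, _⟩ := Bool.and_eq_true_iff.1 hg
      have hm : (0 : Int) < p.2 := alph_pos p hpA
      exact phiM_lt ((PySem.Set.contains_iff _ _).1 hg1) (by omega)
    obtain ⟨q, hq⟩ := List.exists_mem_of_ne_nil _ hL0
    have hk1 : 1 ≤ phiM spectrum mass := by have := hchild q hq; omega
    have hbound : ∀ x ∈ L.map (fun p : String × Int => 21 ^ phiM spectrum (mass + p.2)),
        x ≤ 21 ^ (phiM spectrum mass - 1) := by
      intro x hx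
      rcases List.mem_map.1 hx with ⟨p, hp, rfl⟩
      exact Nat.pow_le_pow_right (by norm_num) (by have := hchild p hp; omega)
    have hsum := List.sum_le_card_nsmul _ _ hbound
    have hlen : (L.map (fun p : String × Int => 21 ^ phiM spectrum (mass + p.2))).length ≤ 20 := by
      rw [List.length_map, hL]
      have h1 := List.length_filter_le (fun p : String × Int =>
        PySem.Set.contains spectrum (mass + p.2)
          && PySem.Set.contains spectrum (target - mass - p.2)) ALPH
      have h20 : ALPH.length = 20 := by decide
      omega
    have hpow : (21:ℕ) ^ phiM spectrum mass = 21 ^ (phiM spectrum mass - 1) * 21 := by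
      rw [← pow_succ]; congr 1; omega
    calc (L.map (fun p : String × Int => 21 ^ phiM spectrum (mass + p.2))).sum
        ≤ _ • (21 ^ (phiM spectrum mass - 1)) := hsum
      _ ≤ 20 * 21 ^ (phiM spectrum mass - 1) := by
            rw [smul_eq_mul]; exact Nat.mul_le_mul_right _ hlen
      _ < 21 ^ (phiM spectrum mass - 1) * 21 := by
            have hb1 : 1 ≤ (21:ℕ) ^ (phiM spectrum mass - 1) := Nat.one_le_pow _ _ (by norm_num)
            omega
      _ = 21 ^ phiM spectrum mass := hpow.symm

-- the acceptance test of Source B: set(prefixes) | {target - p for p in prefixes} == spectrum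
def checkB (spectrum : List Int) (target : Int) (prefixes : List Int) : Bool :=
  PySem.Set.equal
    (PySem.Set.union (PySem.Set.ofList prefixes) (prefixes.map (fun p => target - p)))
    spectrum

-- the while loop of Source B; the head of the Lean list is the TOP of the Python stack
-- (Python pops from the end and extends with reversed(children), so the next entries popped
-- are exactly `children` in forward order: here `children ++ rest`). mass = prefixes[-1];
-- prefixes is never empty, so getLastD's default is unreachable.
def loopB (spectrum : List Int) (target : Int) : List (String × List Int) → Option String
  | [] => none
  | (path, prefixes) :: rest =>
    let mass := prefixes.getLastD 0
    if mass == target then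
      if checkB spectrum target prefixes then some path
      else loopB spectrum target rest
    else
      loopB spectrum target (childrenB spectrum target path prefixes mass ++ rest)
termination_by stack => stackM spectrum stack
decreasing_by
  · simp only [stackM, List.map_cons, List.sum_cons]
    have := pow_pos (by norm_num : (0:ℕ) < 21) (phiM spectrum (prefixes.getLastD 0))
    omega
  · have h := stackM_children_lt spectrum target path prefixes (prefixes.getLastD 0)
    simp only [stackM, List.map_append, List.sum_append, List.map_cons, List.sum_cons] at h ⊢
    omega

def get_peptide_alt (spectrum : List Int) : Option String :=
  match PySem.List.max? spectrum (fun x => x) with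
  | none => none          -- max(spectrum) raises ValueError on the empty set; excluded by Pre_
  | some target => loopB spectrum target [("", [0])]

-- ===== PRECONDITION & SPEC =====
-- Pre_ excludes only the empty list, on which Python A raises ValueError (max of an empty set).
def Pre_get_peptide (spectrum : List Int) : Prop := spectrum ≠ []
instance (spectrum : List Int) : Decidable (Pre_get_peptide spectrum) := by unfold Pre_get_peptide; infer_instance
def pvWitness_get_peptide : List Int := [57, 0]

def Spec_get_peptide (spectrum : List Int) (out : Option String) : Prop := out = get_peptide_alt spectrum
instance (spectrum : List Int) (out : Option String) : Decidable (Spec_get_peptide spectrum out) := by unfold Spec_get_peptide; infer_instance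

-- ===== CLAIM (what is proved, stated in full; the proofs are below) =====
def Claim_equal_get_peptide : Prop := ∀ (spectrum : List Int), Dom_get_peptide spectrum → Pre_get_peptide spectrum → Spec_get_peptide spectrum (get_peptide spectrum)

-- ===== LEMMAS AND PROOFS =====

-- invariant tying a stack entry of B to the dfs state of A: the carried prefix list is the
-- prefix-mass list of the carried path
def InvB (e : String × List Int) : Prop :=
  e.2 = (e.1.toList.map alphaVal).scanl (· + ·) 0

theorem scanl_ne_nil (a : Int) (xs : List Int) : xs.scanl (· + ·) a ≠ [] := by
  cases xs <;> simp [List.scanl]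

theorem getLastD_cons_ne_nil (a : Int) (s : List Int) (h : s ≠ []) :
    (a :: s).getLastD 0 = s.getLastD 0 := by
  cases s with
  | nil => exact absurd rfl h
  | cons x t => simp

theorem scanl_concat (xs : List Int) (a v : Int) :
    (xs ++ [v]).scanl (· + ·) a
      = xs.scanl (· + ·) a ++ [(xs.scanl (· + ·) a).getLastD 0 + v] := by
  induction xs generalizing a with
  | nil => simp [List.scanl]
  | cons x xs ih =>
    simp only [List.cons_append, List.scanl_cons]
    rw [ih (a + x), getLastD_cons_ne_nil a _ (scanl_ne_nil (a + x) xs)]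

theorem alph_keys : ∀ p ∈ ALPH, p.1.toList.map alphaVal = [p.2] := by decide

theorem child_inv {path : String} {prefixes : List Int}
    (hI : prefixes = (path.toList.map alphaVal).scanl (· + ·) 0)
    (p : String × Int) (hp : p ∈ ALPH) :
    InvB (path ++ p.1, prefixes ++ [prefixes.getLastD 0 + p.2]) := by
  unfold InvB
  simp only
  rw [String.toList_append, List.map_append, alph_keys p hp, hI, ← scanl_concat]

-- get_spectrum with its lets expanded
theorem get_spectrum_eq (s : String) :
    get_spectrum s
      = PySem.List.sorted
          (PySem.Set.union (PySem.Set.ofList ((s.toList.map alphaVal).scanl (· + ·) 0))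
            (((s.toList.map alphaVal).scanl (· + ·) 0).map
              (fun p => ((s.toList.map alphaVal).scanl (· + ·) 0).getLastD 0 - p)))
          (fun x => x) false := rfl

-- both sides' final membership test agree: sorting then set() does not change the set
theorem check_eq (spectrum prefixes : List Int) (path : String) (target : Int)
    (hI : prefixes = (path.toList.map alphaVal).scanl (· + ·) 0)
    (hT : prefixes.getLastD 0 = target) :
    PySem.Set.equal (PySem.Set.ofList (get_spectrum path)) spectrum
      = checkB spectrum target prefixes := by
  rw [get_spectrum_eq, ← hI, hT]
  unfold checkB
  rw [Bool.eq_iff_iff, PySem.Set.equal_iff, PySem.Set.equal_iff]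
  constructor <;> intro h x <;>
    simpa [PySem.Set.mem_ofList, PySem.List.mem_sorted] using h x

-- A's guard as B writes it
theorem guard_eq (spectrum : List Int) (target mass m : Int) :
    guardA spectrum target mass m
      = (PySem.Set.contains spectrum (mass + m)
          && PySem.Set.contains spectrum (target - mass - m)) := by
  rw [Bool.eq_iff_iff, Bool.and_eq_true_iff]
  unfold guardA
  rw [PySem.Set.issubset_iff, PySem.Set.contains_iff, PySem.Set.contains_iff]
  constructor
  · intro h
    refine ⟨h _ (by rw [PySem.Set.mem_ofList]; simp), ?_⟩
    have := h (target - (mass + m)) (by rw [PySem.Set.mem_ofList]; simp)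
    have he : target - (mass + m) = target - mass - m := by ring
    rwa [he] at this
  · rintro ⟨h1, h2⟩ x hx
    rw [PySem.Set.mem_ofList] at hx
    rcases List.mem_pair.1 hx with rfl | rfl
    · exact h1
    · have he : target - (mass + m) = target - mass - m := by ring
      rw [he]; exact h2

theorem dfsGo_or (spectrum : List Int) (target mass : Int) (path : String)
    (l : List {p : String × Int // p ∈ ALPH}) (X : Option String) :
    (dfsGo spectrum target mass path l).or X
      = ((l.map Subtype.val).filter (fun p => guardA spectrum target mass p.2)).foldr
          (fun p acc => (dfsA spectrum target (mass + p.2) (path ++ p.1)).or acc) X := by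
  induction l with
  | nil => simp [dfsGo]
  | cons q rest ih =>
    obtain ⟨⟨aa, m⟩, hp⟩ := q
    by_cases hg : guardA spectrum target mass m = true
    · rw [dfsGo]
      rw [dif_pos hg]
      cases h : dfsA spectrum target (mass + m) (path ++ aa) with
      | some r => simp [h, hg]
      | none => simp [h, hg, ih]
    · rw [dfsGo]
      rw [dif_neg hg]
      simp [hg, ih]

theorem dfsA_or (spectrum : List Int) (target mass : Int) (path : String) (X : Option String)
    (hne : (mass == target) = false) :
    (dfsA spectrum target mass path).or X
      = (ALPH.filter (fun p => guardA spectrum target mass p.2)).foldr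
          (fun p acc => (dfsA spectrum target (mass + p.2) (path ++ p.1)).or acc) X := by
  rw [dfsA, hne]
  simp only [Bool.false_eq_true, if_false]
  rw [dfsGo_or, List.attach_map_subtype_val]

-- the stack loop of B computes the foldr of A's dfs over the (path-derived) entries
theorem loop_eq_foldr (spectrum : List Int) (target : Int) (stack : List (String × List Int))
    (hsI : ∀ e ∈ stack, InvB e) :
    loopB spectrum target stack
      = stack.foldr (fun e acc =>
          (dfsA spectrum target (e.2.getLastD 0) e.1).or acc) none := by
  fun_induction loopB spectrum target stack with
  | case1 => rfl
  | case2 path prefixes rest mass hm hc =>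
    have hI := hsI (path, prefixes) (by simp)
    unfold InvB at hI; simp only at hI
    have hT : prefixes.getLastD 0 = target := by simpa [mass] using hm
    rw [List.foldr_cons, dfsA, hT]
    simp only [BEq.rfl, if_pos]
    rw [check_eq spectrum prefixes path target hI hT, hc]
    simp
  | case3 path prefixes rest mass hm hc ih =>
    have hI := hsI (path, prefixes) (by simp)
    unfold InvB at hI; simp only at hI
    have hT : prefixes.getLastD 0 = target := by simpa [mass] using hm
    rw [List.foldr_cons, dfsA, hT]
    simp only [BEq.rfl, if_pos]
    rw [check_eq spectrum prefixes path target hI hT, if_neg hc]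
    simp only [Option.none_or]
    exact ih (fun e he => hsI e (by simp [he]))
  | case4 path prefixes rest mass hm ih =>
    have hI := hsI (path, prefixes) (by simp)
    unfold InvB at hI; simp only at hI
    have hm' : (prefixes.getLastD 0 == target) = false := by simpa [mass] using hm
    have hchildInv : ∀ e ∈ childrenB spectrum target path prefixes mass, InvB e := by
      intro e he
      unfold childrenB at he
      rcases List.mem_map.1 he with ⟨p, hp, rfl⟩
      have := child_inv hI p (List.mem_filter.1 hp).1
      simpa [mass] using this
    rw [ih (by
      intro e he
      rcases List.mem_append.1 he with h | h
      · exact hchildInv e h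
      · exact hsI e (by simp [h]))]
    rw [List.foldr_append, List.foldr_cons]
    rw [dfsA_or spectrum target (prefixes.getLastD 0) path _ hm']
    unfold childrenB
    rw [List.foldr_map]
    have hfil : (fun p : String × Int => guardA spectrum target (prefixes.getLastD 0) p.2)
        = (fun p : String × Int => PySem.Set.contains spectrum (mass + p.2)
            && PySem.Set.contains spectrum (target - mass - p.2)) := by
      funext p
      simp only [mass]
      exact guard_eq spectrum target (prefixes.getLastD 0) p.2
    rw [hfil]
    simp only [mass, List.getLastD_concat]

-- ===== VERDICT (by name: the statement is the Claim_ definition above) =====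
theorem get_peptide_spec : Claim_equal_get_peptide := by
  intro spectrum _ _
  unfold Spec_get_peptide get_peptide get_peptide_alt
  cases PySem.List.max? spectrum (fun x => x) with
  | none => rfl
  | some target =>
    dsimp only
    rw [loop_eq_foldr spectrum target [("", [0])]
      (by intro e he; simp at he; subst he; rfl)]
    simp [List.foldr]
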